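-- pv_equiv track=rewrite | github.com/nlylmz/MentalBlackboard | img_text_map.py | has_sequential_diagonal_folds
-- ===== SOURCE A (Python) =====
-- def has_sequential_diagonal_folds(actions):
--     """Return True if two or more sequential diagonal folds exist."""
--
--     diagonal_keywords = [
--         "diagonal_topLeft_to_bottomRight",
--         "diagonal_bottomRight_to_topLeft",
--         "diagonal_topRight_to_bottomLeft",
--         "diagonal_bottomLeft_to_topRight"
--     ]
--     for i in range(len(actions) - 1):
--         if actions[i] in diagonal_keywords and actions[i + 1] in diagonal_keywords:
--             return True
--     return False
-- ===== SOURCE B (Python) =====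
-- def has_sequential_diagonal_folds(actions):
--     """Return True if two or more sequential diagonal folds exist."""
--     diagonal_keywords = {
--         "diagonal_topLeft_to_bottomRight",
--         "diagonal_bottomRight_to_topLeft",
--         "diagonal_topRight_to_bottomLeft",
--         "diagonal_bottomLeft_to_topRight",
--     }
--     positions = [i for i, a in enumerate(actions) if a in diagonal_keywords]
--     return any(j == i + 1 for i, j in zip(positions, positions[1:]))
-- ===== Notes on version B (the rewrite author's own statement) =====
-- stated objective: alternative
-- what changed: Instead of scanning index pairs and testing membership of both neighbours at each step, B first extracts the list of positions of diagonal actions and then checks whether any two consecutive recorded positions differ by exactly 1.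
import Mathlib
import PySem

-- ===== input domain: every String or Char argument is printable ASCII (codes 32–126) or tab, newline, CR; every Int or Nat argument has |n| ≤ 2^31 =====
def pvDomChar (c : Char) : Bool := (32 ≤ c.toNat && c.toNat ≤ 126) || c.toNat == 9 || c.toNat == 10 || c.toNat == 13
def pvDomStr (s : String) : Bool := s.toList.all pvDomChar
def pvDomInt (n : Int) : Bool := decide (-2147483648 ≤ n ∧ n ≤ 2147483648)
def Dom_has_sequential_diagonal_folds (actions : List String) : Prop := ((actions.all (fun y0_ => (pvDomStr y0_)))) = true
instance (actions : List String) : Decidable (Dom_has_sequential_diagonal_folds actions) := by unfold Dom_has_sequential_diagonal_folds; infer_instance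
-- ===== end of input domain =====

-- B replaces A's scan over index pairs with a two-stage computation: first collect
-- the positions of diagonal actions, then check whether two consecutive recorded
-- positions differ by exactly 1 (objective: alternative decomposition).

-- ===== PORT A =====
def pvDiagKeywords : List String :=
  ["diagonal_topLeft_to_bottomRight",
   "diagonal_bottomRight_to_topLeft",
   "diagonal_topRight_to_bottomLeft",
   "diagonal_bottomLeft_to_topRight"]

-- the loop over the index list; indices produced by range(len-1) are always in
-- range, so pyGetD with a dummy default is exact here
def pvALoop (actions : List String) : List Int → Bool
  | [] => false
  | i :: rest =>
    if pvDiagKeywords.contains (PySem.List.pyGetD actions i "")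
        && pvDiagKeywords.contains (PySem.List.pyGetD actions (i + 1) "") then
      true
    else
      pvALoop actions rest

def has_sequential_diagonal_folds (actions : List String) : Bool :=
  pvALoop actions (PySem.List.pyRange 0 ((actions.length : Int) - 1) 1)

-- ===== PORT B =====
def pvDiagSet : PySem.Set String := PySem.Set.ofList pvDiagKeywords

-- positions = [i for i, a in enumerate(actions) if a in diagonal_keywords]
def pvPositions (actions : List String) : List Int :=
  (PySem.List.enumerate actions).filterMap
    (fun p => if pvDiagSet.contains p.2 then some p.1 else none)

-- any(j == i + 1 for i, j in zip(positions, positions[1:])); positions[1:] is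
-- drop 1 exactly, since 1 is a nonnegative in-range-or-clamped slice index
def has_sequential_diagonal_folds_alt (actions : List String) : Bool :=
  let ps := pvPositions actions
  (ps.zip (ps.drop 1)).any (fun p => p.2 == p.1 + 1)

-- ===== PRECONDITION & SPEC =====
def Spec_has_sequential_diagonal_folds (actions : List String) (out : Bool) : Prop := out = has_sequential_diagonal_folds_alt actions
instance (actions : List String) (out : Bool) : Decidable (Spec_has_sequential_diagonal_folds actions out) := by unfold Spec_has_sequential_diagonal_folds; infer_instance

-- ===== CLAIM (what is proved, stated in full; the proofs are below) =====
def Claim_equal_has_sequential_diagonal_folds : Prop := ∀ (actions : List String), Dom_has_sequential_diagonal_folds actions → Spec_has_sequential_diagonal_folds actions (has_sequential_diagonal_folds actions)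

-- ===== LEMMAS AND PROOFS =====

-- common reference: adjacent-pair recursion over the action list
def pvPairF : List String → Bool
  | a :: b :: rest =>
      (pvDiagKeywords.contains a && pvDiagKeywords.contains b) || pvPairF (b :: rest)
  | _ => false

-- reference recursion for B's first stage: positions of diagonal actions, from n
def pvIdxsFrom (n : Int) : List String → List Int
  | [] => []
  | a :: xs =>
      if pvDiagKeywords.contains a then n :: pvIdxsFrom (n + 1) xs
      else pvIdxsFrom (n + 1) xs

-- reference recursion for B's second stage: some consecutive pair differs by 1
def pvAdj : List Int → Bool
  | i :: j :: r => (j == i + 1) || pvAdj (j :: r)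
  | _ => false

lemma pvDiagSet_contains (s : String) :
    pvDiagSet.contains s = pvDiagKeywords.contains s := by
  have h : pvDiagSet = pvDiagKeywords := by decide
  rw [h]
  rfl

lemma pvZipAny_eq_adj : ∀ (l : List Int),
    (l.zip (l.drop 1)).any (fun p => p.2 == p.1 + 1) = pvAdj l
  | [] => rfl
  | [_] => rfl
  | i :: j :: r => by
      rw [pvAdj, ← pvZipAny_eq_adj (j :: r)]
      simp

lemma pvPositions_eq_idxsFrom : ∀ (xs : List String) (n : Int),
    (PySem.List.enumerate xs n).filterMap
        (fun p => if pvDiagSet.contains p.2 then some p.1 else none)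
      = pvIdxsFrom n xs
  | [], _ => rfl
  | a :: xs, n => by
      rw [PySem.List.enumerate_cons, List.filterMap_cons,
        pvPositions_eq_idxsFrom xs (n + 1), pvIdxsFrom]
      simp only [pvDiagSet_contains]
      cases h : pvDiagKeywords.contains a <;> simp [h]

lemma pvIdxsFrom_ge : ∀ (xs : List String) (n x : Int),
    x ∈ pvIdxsFrom n xs → n ≤ x
  | [], _, _ => by simp [pvIdxsFrom]
  | a :: xs, n, x => by
      rw [pvIdxsFrom]
      split_ifs with h
      · intro hx
        rcases List.mem_cons.mp hx with rfl | hx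
        · omega
        · have := pvIdxsFrom_ge xs (n + 1) x hx; omega
      · intro hx
        have := pvIdxsFrom_ge xs (n + 1) x hx; omega

lemma pvAdj_idxsFrom : ∀ (xs : List String) (n : Int),
    pvAdj (pvIdxsFrom n xs) = pvPairF xs
  | [], _ => rfl
  | [a], n => by
      rw [pvIdxsFrom]
      split_ifs <;> rfl
  | a :: b :: rest, n => by
      rw [pvIdxsFrom]
      split_ifs with ha
      · rw [pvIdxsFrom]
        split_ifs with hb
        · rw [pvAdj, pvPairF, ha, hb]
          simp
        · -- head of pvIdxsFrom (n+2) rest is ≥ n+2, so the pair (n, head) never fires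
          have hrec : pvAdj (pvIdxsFrom (n + 1 + 1) rest) = pvPairF (b :: rest) := by
            have h := pvAdj_idxsFrom (b :: rest) (n + 1)
            rw [pvIdxsFrom] at h
            rw [if_neg hb] at h
            exact h
          have hb' : pvDiagKeywords.contains b = false := by simpa using hb
          rw [pvPairF, ha]
          cases hL : pvIdxsFrom (n + 1 + 1) rest with
          | nil =>
            rw [hL] at hrec
            rw [hb', ← hrec]
            simp [pvAdj]
          | cons l r =>
            have hl : n + 1 + 1 ≤ l := pvIdxsFrom_ge rest _ l (by rw [hL]; exact List.mem_cons_self)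
            have hne : (l == n + 1) = false := by
              simp only [beq_eq_false_iff_ne]; omega
            rw [pvAdj, hne, Bool.false_or, ← hL, hrec, hb']
            simp
      · have ha' : pvDiagKeywords.contains a = false := by simpa using ha
        rw [pvPairF, ha', Bool.false_and, Bool.false_or]
        exact pvAdj_idxsFrom (b :: rest) (n + 1)

lemma pvAlt_eq_pairF (xs : List String) :
    has_sequential_diagonal_folds_alt xs = pvPairF xs := by
  rw [has_sequential_diagonal_folds_alt, pvPositions, pvZipAny_eq_adj,
    pvPositions_eq_idxsFrom, pvAdj_idxsFrom]

lemma pvALoop_eq_any (actions : List String) : ∀ (l : List Int),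
    pvALoop actions l
      = l.any (fun i =>
          pvDiagKeywords.contains (PySem.List.pyGetD actions i "")
            && pvDiagKeywords.contains (PySem.List.pyGetD actions (i + 1) ""))
  | [] => by simp [pvALoop]
  | i :: rest => by
      rw [pvALoop, pvALoop_eq_any actions rest]
      cases h : (pvDiagKeywords.contains (PySem.List.pyGetD actions i "")
            && pvDiagKeywords.contains (PySem.List.pyGetD actions (i + 1) "")) <;>
        rw [List.any_cons, h] <;> simp

lemma pvA_eq_pairF : ∀ (xs : List String),
    has_sequential_diagonal_folds xs = pvPairF xs
  | [] => by decide
  | [a] => by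
      simp [has_sequential_diagonal_folds, pvPairF,
        PySem.List.pyRange_one_eq_nil, pvALoop]
  | a :: b :: rest => by
      have hlen : ((a :: b :: rest).length : Int) - 1 = (rest.length : Int) + 1 := by
        simp
      rw [has_sequential_diagonal_folds, hlen, pvALoop_eq_any,
        PySem.List.pyRange_one_cons (by omega), List.any_cons]
      have hshift :
          (PySem.List.pyRange (0 + 1) ((rest.length : Int) + 1) 1).any (fun i =>
              pvDiagKeywords.contains (PySem.List.pyGetD (a :: b :: rest) i "")
                && pvDiagKeywords.contains (PySem.List.pyGetD (a :: b :: rest) (i + 1) ""))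
            = (PySem.List.pyRange 0 (rest.length : Int) 1).any (fun i =>
              pvDiagKeywords.contains (PySem.List.pyGetD (b :: rest) i "")
                && pvDiagKeywords.contains (PySem.List.pyGetD (b :: rest) (i + 1) "")) := by
        rw [PySem.List.pyRange_one, PySem.List.pyRange_one]
        simp only [List.any_map]
        have hn : ((rest.length : Int) + 1 - (0 + 1)).toNat = ((rest.length : Int) - 0).toNat := by
          omega
        rw [hn]
        congr 1
        funext k
        have h1 : PySem.List.pyGetD (a :: b :: rest) (0 + 1 + (k : Int)) ""
            = PySem.List.pyGetD (b :: rest) (0 + (k : Int)) "" := by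
          have e1 : (0 : Int) + 1 + (k : Int) = ((k + 1 : Nat) : Int) := by omega
          have e2 : (0 : Int) + (k : Int) = ((k : Nat) : Int) := by omega
          rw [e1, e2, PySem.List.pyGetD_natCast, PySem.List.pyGetD_natCast]
          simp
        have h2 : PySem.List.pyGetD (a :: b :: rest) (0 + 1 + (k : Int) + 1) ""
            = PySem.List.pyGetD (b :: rest) (0 + (k : Int) + 1) "" := by
          have e1 : (0 : Int) + 1 + (k : Int) + 1 = ((k + 2 : Nat) : Int) := by omega
          have e2 : (0 : Int) + (k : Int) + 1 = ((k + 1 : Nat) : Int) := by omega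
          rw [e1, e2, PySem.List.pyGetD_natCast, PySem.List.pyGetD_natCast]
          simp
        simp only [Function.comp]
        rw [h1, h2]
      rw [hshift]
      have htail := pvA_eq_pairF (b :: rest)
      rw [has_sequential_diagonal_folds, pvALoop_eq_any] at htail
      have hlen2 : ((b :: rest).length : Int) - 1 = (rest.length : Int) := by
        simp
      rw [hlen2] at htail
      rw [htail, pvPairF]
      have h0 : PySem.List.pyGetD (a :: b :: rest) 0 "" = a :=
        PySem.List.pyGetD_zero_cons ..
      have h1 : PySem.List.pyGetD (a :: b :: rest) (1 : Int) "" = b := by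
        rw [show (1 : Int) = ((1 : Nat) : Int) from rfl, PySem.List.pyGetD_natCast]
        simp
      simp [h0, h1]

-- ===== VERDICT (by name: the statement is the Claim_ definition above) =====
theorem has_sequential_diagonal_folds_spec : Claim_equal_has_sequential_diagonal_folds := by
  intro actions _
  unfold Spec_has_sequential_diagonal_folds
  rw [pvA_eq_pairF, pvAlt_eq_pairF]
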